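-- pv_equiv track=rewrite | github.com/DonOutcast/Yandex_Algorithms-v1.0 | src/lesson_3/words.py | words_in_dict
-- ===== SOURCE A (Python) =====
-- def words_in_dict(dictionary, text):
--     good_words = set(dictionary)
--     for word in dictionary:
--         for delpos in range(len(word)):
--             good_words.add(word[:delpos] + word[delpos + 1 :])
--     ans = []
--     for word in text:
--         ans.append(word in good_words)
--     return ans
-- ===== SOURCE B (Python) =====
-- def words_in_dict(dictionary, text):
--     def match(w, t):
--         if w == t:
--             return True
--         if len(w) != len(t) + 1:
--             return False
--         return any(w[:i] + w[i + 1:] == t for i in range(len(w)))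
--
--     return [any(match(w, word) for w in dictionary) for word in text]
-- ===== Notes on version B (the rewrite author's own statement) =====
-- stated objective: simpler
-- what changed: B drops A's precomputed set of all one-deletion variants and instead, per text word, scans the dictionary with an on-the-fly match predicate (equal, or longer by one and equal after deleting one character).
import Mathlib
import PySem

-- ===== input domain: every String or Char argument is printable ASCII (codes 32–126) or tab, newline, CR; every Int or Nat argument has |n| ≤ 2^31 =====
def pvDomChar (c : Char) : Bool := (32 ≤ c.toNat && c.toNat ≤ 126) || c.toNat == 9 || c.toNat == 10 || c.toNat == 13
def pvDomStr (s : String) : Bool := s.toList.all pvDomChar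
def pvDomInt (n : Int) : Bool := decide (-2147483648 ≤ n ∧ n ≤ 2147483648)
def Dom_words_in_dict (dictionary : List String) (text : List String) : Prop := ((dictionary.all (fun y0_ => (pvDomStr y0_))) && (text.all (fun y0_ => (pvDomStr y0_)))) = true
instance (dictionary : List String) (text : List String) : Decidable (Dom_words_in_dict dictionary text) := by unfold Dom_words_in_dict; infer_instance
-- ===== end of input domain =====

-- B replaces A's precomputed one-deletion-variant set by a direct per-text-word scan of the
-- dictionary with an on-the-fly one-deletion match; objective: simpler (no speed claim).


-- ===== PORT A =====
-- strings are handled as List Char (PySem.Chars side); word[:i] + word[i+1:]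
def pvDelA (w : List Char) (i : Int) : List Char :=
  PySem.List.slice w none (some i) ++ PySem.List.slice w (some (i + 1)) none

-- good_words = set(dictionary); for word in dictionary: for delpos in range(len(word)): good_words.add(...)
def pvGoodWords (dictionary : List String) : PySem.Set (List Char) :=
  dictionary.foldl
    (fun s word =>
      (PySem.List.pyRange 0 (PySem.Chars.len word.toList)).foldl
        (fun s delpos => s.add (pvDelA word.toList delpos)) s)
    (PySem.Set.ofList (dictionary.map String.toList))

def words_in_dict (dictionary : List String) (text : List String) : List Bool :=
  text.foldl (fun ans word => ans ++ [(pvGoodWords dictionary).contains word.toList]) []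

-- ===== PORT B =====
-- match(w, t): equal, or len(w) == len(t) + 1 and some single deletion of w equals t
def pvMatchB (w t : List Char) : Bool :=
  if w == t then true
  else if !(PySem.Chars.len w == PySem.Chars.len t + 1) then false
  else (PySem.List.pyRange 0 (PySem.Chars.len w)).any
    (fun i => PySem.List.slice w none (some i) ++ PySem.List.slice w (some (i + 1)) none == t)

def words_in_dict_alt (dictionary : List String) (text : List String) : List Bool :=
  text.map (fun word => dictionary.any (fun w => pvMatchB w.toList word.toList))

-- ===== PRECONDITION & SPEC =====
def Spec_words_in_dict (dictionary : List String) (text : List String) (out : List Bool) : Prop := out = words_in_dict_alt dictionary text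
instance (dictionary : List String) (text : List String) (out : List Bool) : Decidable (Spec_words_in_dict dictionary text out) := by unfold Spec_words_in_dict; infer_instance

-- ===== CLAIM (what is proved, stated in full; the proofs are below) =====
def Claim_equal_words_in_dict : Prop := ∀ (dictionary : List String) (text : List String), Dom_words_in_dict dictionary text → Spec_words_in_dict dictionary text (words_in_dict dictionary text)

-- ===== LEMMAS AND PROOFS =====

-- inner loop of A: membership after folding `add` over a list of indices
theorem pv_mem_foldl_add (l : List Int) (f : Int → List Char) (s : PySem.Set (List Char)) (x : List Char) :
    x ∈ l.foldl (fun s i => s.add (f i)) s ↔ x ∈ s ∨ ∃ i ∈ l, x = f i := by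
  induction l generalizing s with
  | nil => simp
  | cons a tl ih =>
    simp [List.foldl_cons, ih, PySem.Set.mem_add]
    tauto

-- the whole good_words set, characterised
theorem pv_mem_goodWords (dictionary : List String) (x : List Char) :
    x ∈ pvGoodWords dictionary ↔
      ∃ w ∈ dictionary, x = w.toList ∨
        ∃ i ∈ PySem.List.pyRange 0 (PySem.Chars.len w.toList), x = pvDelA w.toList i := by
  unfold pvGoodWords
  have main : ∀ (ws : List String) (s : PySem.Set (List Char)),
      x ∈ ws.foldl
        (fun s word =>
          (PySem.List.pyRange 0 (PySem.Chars.len word.toList)).foldl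
            (fun s delpos => s.add (pvDelA word.toList delpos)) s) s ↔
      x ∈ s ∨ ∃ w ∈ ws, ∃ i ∈ PySem.List.pyRange 0 (PySem.Chars.len w.toList), x = pvDelA w.toList i := by
    intro ws
    induction ws with
    | nil => simp
    | cons a tl ih =>
      intro s
      rw [List.foldl_cons, ih, pv_mem_foldl_add]
      constructor
      · rintro ((h | ⟨i, hi, hx⟩) | ⟨w, hw, i, hi, hx⟩)
        · exact Or.inl h
        · exact Or.inr ⟨a, List.mem_cons_self, i, hi, hx⟩
        · exact Or.inr ⟨w, List.mem_cons_of_mem a hw, i, hi, hx⟩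
      · rintro (h | ⟨w, hw, i, hi, hx⟩)
        · exact Or.inl (Or.inl h)
        · rcases List.mem_cons.mp hw with rfl | hw'
          · exact Or.inl (Or.inr ⟨i, hi, hx⟩)
          · exact Or.inr ⟨w, hw', i, hi, hx⟩
  rw [main, PySem.Set.mem_ofList]
  simp only [List.mem_map]
  constructor
  · rintro (⟨w, hw, hx⟩ | ⟨w, hw, i, hi, hx⟩)
    · exact ⟨w, hw, Or.inl hx.symm⟩
    · exact ⟨w, hw, Or.inr ⟨i, hi, hx⟩⟩
  · rintro ⟨w, hw, hx | ⟨i, hi, hx⟩⟩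
    · exact Or.inl ⟨w, hw, hx.symm⟩
    · exact Or.inr ⟨w, hw, i, hi, hx⟩

-- a one-deletion variant of w (at a valid index) is one shorter than w
theorem pv_delA_length (w : List Char) (i : Int) (h0 : 0 ≤ i) (hlt : i < (w.length : Int)) :
    (pvDelA w i).length + 1 = w.length := by
  unfold pvDelA
  rw [PySem.List.slice_to w h0, PySem.List.slice_from w (by omega : (0:Int) ≤ i + 1)]
  have h1 : i.toNat < w.length := by omega
  have h2 : (i + 1).toNat = i.toNat + 1 := by omega
  simp [List.length_append, List.length_take, List.length_drop, h2]
  omega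

-- B's match predicate, characterised in A's terms
theorem pv_match_iff (w t : List Char) :
    pvMatchB w t = true ↔
      t = w ∨ ∃ i ∈ PySem.List.pyRange 0 (PySem.Chars.len w), t = pvDelA w i := by
  unfold pvMatchB
  split_ifs with heq hlen
  · simp only [beq_iff_eq] at heq
    simp [heq]
  · -- length mismatch: no deletion variant can equal t, and w ≠ t
    simp only [Bool.not_eq_true', beq_eq_false_iff_ne, ne_eq] at hlen
    simp only [beq_iff_eq] at heq
    constructor
    · intro h; exact absurd h (by simp)
    · rintro (h | ⟨i, hi, h⟩)
      · exact absurd h.symm heq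
      · exfalso
        rw [PySem.List.mem_pyRange_one] at hi
        simp only [PySem.Chars.len_eq] at hi hlen
        have := pv_delA_length w i hi.1 hi.2
        rw [← h] at this
        omega
  · simp only [beq_iff_eq] at heq
    simp only [List.any_eq_true, beq_iff_eq]
    constructor
    · rintro ⟨i, hi, h⟩
      exact Or.inr ⟨i, hi, h.symm⟩
    · rintro (h | ⟨i, hi, h⟩)
      · exact absurd h.symm heq
      · exact ⟨i, hi, h.symm⟩

-- per-text-word agreement of the two programs
theorem pv_elem_eq (dictionary : List String) (word : String) :
    (pvGoodWords dictionary).contains word.toList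
      = dictionary.any (fun w => pvMatchB w.toList word.toList) := by
  rw [Bool.eq_iff_iff, PySem.Set.contains_iff, pv_mem_goodWords]
  simp only [List.any_eq_true, pv_match_iff]

-- ===== VERDICT (by name: the statement is the Claim_ definition above) =====
theorem words_in_dict_spec : Claim_equal_words_in_dict := by
  intro dictionary text _
  unfold Spec_words_in_dict words_in_dict words_in_dict_alt
  rw [PySem.List.foldl_append_singleton_eq_map]
  exact List.map_congr_left (fun word _ => pv_elem_eq dictionary word)
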